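-- pv_equiv track=rewrite | github.com/thetwoj/advent-of-code-2019 | day04/password_calculator.py | calculate_passwords
-- ===== SOURCE A (Python) =====
-- def digits_decrease(x):
--     prev_digit = "0"
--     for digit in str(x):
--         if digit < prev_digit:
--             return True
--         prev_digit = digit
--     return False
--
-- def no_double(x):
--     prev_digit = None
--     for digit in str(x):
--         if digit == prev_digit:
--             return False
--         prev_digit = digit
--     return True
--
-- def has_isolated_double(x):
--     prev_prev_digit = None
--     prev_digit = None
--     isolated_double = False
--     for index, digit in enumerate(str(x)):
--         if index < len(str(x)) - 1:
--             next_digit = str(x)[index + 1]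
--         else:
--             next_digit = None
--         # first two digits are an isolated double
--         if not prev_prev_digit and prev_digit == digit != next_digit:
--             isolated_double = True
--         # any two digits that aren't in the first or last index are an isolated double
--         if prev_prev_digit != prev_digit == digit != next_digit:
--             isolated_double = True
--         # last two digits are an isolated double
--         if prev_prev_digit != prev_digit == digit and not next_digit:
--             isolated_double = True
--         prev_prev_digit = prev_digit
--         prev_digit = digit
--     if isolated_double:
--         return True
--
-- def calculate_passwords(low, up, part=1):
--     candidates = set()
--     for x in range(low, up):
--         if digits_decrease(x):
--             continue
--         if part == 1 and no_double(x):
--             continue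
--         elif part == 2 and not has_isolated_double(x):
--             continue
--         candidates.add(x)
--
--     return candidates
-- ===== SOURCE B (Python) =====
-- def _runs(s):
--     # run lengths of s, by recursion on the run structure
--     if not s:
--         return []
--     i = 1
--     while i < len(s) and s[i] == s[0]:
--         i += 1
--     return [i] + _runs(s[i:])
--
-- def calculate_passwords(low, up, part=1):
--     found = set()
--     for x in range(max(low, 0), up):
--         s = str(x)
--         if all(a <= b for a, b in zip(s, s[1:])):
--             runs = _runs(s)
--             if part == 1:
--                 ok = any(r >= 2 for r in runs)
--             elif part == 2:
--                 ok = 2 in runs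
--             else:
--                 ok = True
--             if ok:
--                 found.add(x)
--     return found
-- ===== Notes on version B (the rewrite author's own statement) =====
-- stated objective: simpler
-- what changed: Replaces A's three stateful digit-scanning helpers (sentinel-prev loop, prev-None loop, and an indexed lookahead state machine for isolated doubles) by one pairwise zip check plus a recursive run-length encoding of the digit string, from which both double rules are read off directly (any run >= 2 / some run == 2), and skips negatives up front via range(max(low,0), up).
import Mathlib
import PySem

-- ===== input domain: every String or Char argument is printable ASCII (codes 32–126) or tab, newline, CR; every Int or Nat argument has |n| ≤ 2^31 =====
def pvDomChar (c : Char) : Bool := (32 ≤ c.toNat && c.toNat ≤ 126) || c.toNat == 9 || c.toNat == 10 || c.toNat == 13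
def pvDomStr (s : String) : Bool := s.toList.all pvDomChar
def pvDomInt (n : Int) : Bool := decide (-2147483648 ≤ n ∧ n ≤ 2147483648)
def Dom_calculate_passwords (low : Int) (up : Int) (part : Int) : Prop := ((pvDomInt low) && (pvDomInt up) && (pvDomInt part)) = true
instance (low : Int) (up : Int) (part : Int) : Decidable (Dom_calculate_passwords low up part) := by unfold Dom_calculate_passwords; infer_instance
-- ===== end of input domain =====

-- B replaces A's three stateful digit-scanning helpers by a pairwise zip check plus a
-- recursive run-length encoding of the digit string (objective: simpler; not faster).

-- ===== PORT A =====
-- loop of digits_decrease: 'for digit in str(x): if digit < prev_digit: return True'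
def pvDDLoop (prev : Char) : List Char → Bool
  | [] => false
  | c :: t => if c < prev then true else pvDDLoop c t

def digits_decrease (x : Int) : Bool := pvDDLoop '0' (PySem.Int.toChars x)

-- loop of no_double: 'for digit in str(x): if digit == prev_digit: return False'
def pvNDLoop (prev : Option Char) : List Char → Bool
  | [] => true
  | c :: t => if some c == prev then false else pvNDLoop (some c) t

-- body of has_isolated_double's 'for index, digit in enumerate(str(x))' loop;
-- state = (prev_prev_digit, prev_digit, isolated_double); the three 'if's in order
def pvIsoStep (s : List Char) (st : Option Char × Option Char × Bool) (p : Int × Char) :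
    Option Char × Option Char × Bool :=
  let next : Option Char := if p.1 < PySem.List.len s - 1 then PySem.List.pyGet? s (p.1 + 1) else none
  let iso1 := if st.1 == none && st.2.1 == some p.2 && !(some p.2 == next) then true else st.2.2
  let iso2 := if !(st.1 == st.2.1) && st.2.1 == some p.2 && !(some p.2 == next) then true else iso1
  let iso3 := if !(st.1 == st.2.1) && st.2.1 == some p.2 && next == none then true else iso2
  (st.2.1, some p.2, iso3)

-- returns True (= true) when the flag was set, else Python returns None (falsy ⇒ false)
def has_isolated_double (x : Int) : Bool :=
  ((PySem.List.enumerate (PySem.Int.toChars x) 0).foldl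
    (pvIsoStep (PySem.Int.toChars x)) (none, none, false)).2.2

def no_double (x : Int) : Bool := pvNDLoop none (PySem.Int.toChars x)

-- body of A's 'for x in range(low, up)' loop (the two continue-chains, then candidates.add)
def pvBodyA (part : Int) (candidates : List Int) (x : Int) : List Int :=
  if digits_decrease x then candidates
  else if part == 1 && no_double x then candidates
  else if part == 2 && !has_isolated_double x then candidates
  else PySem.Set.add candidates x

def calculate_passwords (low : Int) (up : Int) (part : Int) : List Int :=
  (PySem.List.pyRange low up 1).foldl (pvBodyA part) []

-- ===== PORT B =====
-- Source B's _runs: leading-run length ('while i < len(s) and s[i] == s[0]'), then recurse on s[i:]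
def pvLead (c : Char) : List Char → Nat
  | [] => 0
  | d :: t => if d == c then pvLead c t + 1 else 0

def pvRuns : List Char → List Nat
  | [] => []
  | c :: t => (pvLead c t + 1) :: pvRuns (t.drop (pvLead c t))
termination_by s => s.length
decreasing_by simp [List.length_drop]

-- body of B's 'for x in range(max(low, 0), up)' loop
def pvBodyB (part : Int) (found : List Int) (x : Int) : List Int :=
  let s := PySem.Int.toChars x
  if (s.zip (s.drop 1)).all (fun p => decide (p.1 ≤ p.2)) then
    let runs := pvRuns s
    let ok := if part == 1 then runs.any (fun r => decide (2 ≤ r))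
              else if part == 2 then runs.contains 2
              else true
    if ok then PySem.Set.add found x else found
  else found

def calculate_passwords_alt (low : Int) (up : Int) (part : Int) : List Int :=
  (PySem.List.pyRange (max low 0) up 1).foldl (pvBodyB part) []

-- ===== PRECONDITION & SPEC =====
def Spec_calculate_passwords (low : Int) (up : Int) (part : Int) (out : List Int) : Prop := out = calculate_passwords_alt low up part
instance (low : Int) (up : Int) (part : Int) (out : List Int) : Decidable (Spec_calculate_passwords low up part out) := by unfold Spec_calculate_passwords; infer_instance

-- ===== CLAIM (what is proved, stated in full; the proofs are below) =====
def Claim_equal_calculate_passwords : Prop := ∀ (low : Int) (up : Int) (part : Int), Dom_calculate_passwords low up part → Spec_calculate_passwords low up part (calculate_passwords low up part)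

-- ===== LEMMAS AND PROOFS =====

-- proof-side view of the isolated-double loop: lookahead pairs and a plain recursion
def pvTrig (pp pr : Option Char) (d : Char) (nx : Option Char) : Bool :=
  (pp == none && pr == some d && !(some d == nx)) ||
  (!(pp == pr) && pr == some d && !(some d == nx)) ||
  (!(pp == pr) && pr == some d && nx == none)

def pvIsoZ (pp pr : Option Char) (iso : Bool) : List (Char × Option Char) → Bool
  | [] => iso
  | (d, nx) :: l => pvIsoZ pr (some d) (iso || pvTrig pp pr d nx) l

def pvLA : List Char → List (Char × Option Char)
  | [] => []
  | c :: t => (c, t.head?) :: pvLA t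

-- digits_decrease's loop is the complement of the pairwise non-decrease test
theorem pvDDLoop_eq (s : List Char) : ∀ p : Char,
    pvDDLoop p s = !((p :: s).zip s).all (fun q => decide (q.1 ≤ q.2)) := by
  induction s with
  | nil => intro p; simp [pvDDLoop]
  | cons c t ih =>
      intro p
      by_cases h : c < p
      · simp [pvDDLoop, h, not_le.mpr h]
      · simp [pvDDLoop, h, not_lt.mp h, ih c]

-- no_double's loop is the complement of the adjacent-equal test
theorem pvNDLoop_some_eq (s : List Char) : ∀ p : Char,
    pvNDLoop (some p) s = !((p :: s).zip s).any (fun q => q.1 == q.2) := by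
  induction s with
  | nil => intro p; simp [pvNDLoop]
  | cons c t ih =>
      intro p
      by_cases h : c = p
      · subst h; simp [pvNDLoop]
      · simp [pvNDLoop, h, Ne.symm h, ih c]

theorem pvNDLoop_none_eq (s : List Char) :
    pvNDLoop none s = !(s.zip (s.drop 1)).any (fun q => q.1 == q.2) := by
  cases s with
  | nil => simp [pvNDLoop]
  | cons c t => simp [pvNDLoop, pvNDLoop_some_eq t c]

theorem pvLead_split (t : List Char) (c : Char) :
    List.replicate (pvLead c t) c ++ t.drop (pvLead c t) = t := by
  induction t with
  | nil => simp [pvLead]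
  | cons d u ih =>
      by_cases h : d = c
      · subst h; simp [pvLead, List.replicate_succ, ih]
      · simp [pvLead, h]

theorem pvLead_head (t : List Char) (c d : Char)
    (h : (t.drop (pvLead c t)).head? = some d) : ¬ d = c := by
  induction t with
  | nil => simp [pvLead] at h
  | cons e u ih =>
      by_cases he : e = c
      · subst he; simp [pvLead] at h; exact ih (by simp [List.head?_drop, h])
      · simp [pvLead, he] at h; subst h; exact he

theorem pvLead_pos (t : List Char) (c : Char) (h : 0 < pvLead c t) :
    ∃ u, t = c :: u := by
  cases t with
  | nil => simp [pvLead] at h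
  | cons e u =>
      by_cases he : e = c
      · exact ⟨u, by rw [he]⟩
      · simp [pvLead, he] at h

-- part-1 rule: some run has length ≥ 2 ↔ some adjacent pair is equal
theorem pvRuns_double (n : Nat) : ∀ s : List Char, s.length ≤ n →
    (pvRuns s).any (fun r => decide (2 ≤ r)) = (s.zip (s.drop 1)).any (fun q => q.1 == q.2) := by
  induction n with
  | zero =>
      intro s hs
      rw [List.length_eq_zero_iff.mp (Nat.le_zero.mp hs)]
      simp [pvRuns]
  | succ n ih =>
      intro s hs
      cases s with
      | nil => simp [pvRuns]
      | cons c t =>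
          rcases Nat.eq_zero_or_pos (pvLead c t) with hk | hk
          · cases t with
            | nil => simp [pvRuns, pvLead]
            | cons d u =>
                have hd : ¬ d = c := pvLead_head (d :: u) c d (by simp [hk])
                rw [pvRuns]
                simp only [hk, List.drop_zero, List.any_cons, List.drop_succ_cons,
                  List.zip_cons_cons]
                have := ih (d :: u) (by simpa using Nat.succ_le_succ_iff.mp hs)
                simp only [List.drop_succ_cons, List.drop_zero] at this ⊢
                rw [this]
                simp [Ne.symm hd]
          · obtain ⟨u, hu⟩ := pvLead_pos t c hk
            subst hu
            rw [pvRuns]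
            simp
            exact Or.inl hk

theorem pvIf3 (a b c i : Bool) :
    (if c then true else if b then true else if a then true else i) = (i || (a || b || c)) := by
  cases a <;> cases b <;> cases c <;> cases i <;> rfl

theorem pvIsoStep_eq (s : List Char) (st : Option Char × Option Char × Bool) (p : Int × Char) :
    pvIsoStep s st p = (st.2.1, some p.2, st.2.2 || pvTrig st.1 st.2.1 p.2
      (if p.1 < PySem.List.len s - 1 then PySem.List.pyGet? s (p.1 + 1) else none)) := by
  simp only [pvIsoStep, pvTrig, pvIf3]

-- fold of A's isolated-double loop = pvIsoZ over the lookahead pairs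
theorem pvIsoFold_eq (S : List Char) : ∀ (t : List Char) (k : Nat), t = S.drop k →
    ∀ pp pr iso, ((PySem.List.enumerate t (k : Int)).foldl (pvIsoStep S) (pp, pr, iso)).2.2
      = pvIsoZ pp pr iso (pvLA t) := by
  intro t
  induction t with
  | nil => intro k hk pp pr iso; simp [PySem.List.enumerate_nil, pvLA, pvIsoZ]
  | cons c t' ih =>
      intro k hk pp pr iso
      have ht' : t' = S.drop (k + 1) := by
        rw [← List.drop_drop (i := 1) (j := k), ← hk, List.drop_one, List.tail_cons]
      have hnext : (if (k : Int) < PySem.List.len S - 1 then PySem.List.pyGet? S ((k : Int) + 1)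
          else none) = t'.head? := by
        cases ht'' : t' with
        | nil =>
            have hlen : S.length ≤ k + 1 := by
              rw [← List.drop_eq_nil_iff, ← ht', ht'']
            rw [if_neg (by simp only [PySem.List.len_eq]; omega)]
            simp
        | cons d u =>
            have hlen : k + 1 < S.length := by
              by_contra hle
              have : S.drop (k + 1) = [] := List.drop_eq_nil_of_le (by omega)
              rw [← ht', ht''] at this
              simp at this
            rw [if_pos (by simp only [PySem.List.len_eq]; omega)]
            have : ((k : Int) + 1) = ((k + 1 : Nat) : Int) := by push_cast; ring
            rw [this, PySem.List.pyGet?_natCast, ← List.head?_drop, ← ht', ht'']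
      rw [PySem.List.enumerate_cons, List.foldl_cons, pvIsoStep_eq, hnext]
      have hcast : ((k : Int) + 1) = ((k + 1 : Nat) : Int) := by push_cast; ring
      rw [hcast, ih (k + 1) ht']
      simp [pvLA, pvIsoZ]

theorem pvIsoZ_or (l : List (Char × Option Char)) : ∀ pp pr a,
    pvIsoZ pp pr a l = (a || pvIsoZ pp pr false l) := by
  induction l with
  | nil => intro pp pr a; simp [pvIsoZ]
  | cons p l ih =>
      intro pp pr a
      obtain ⟨d, nx⟩ := p
      simp only [pvIsoZ]
      rw [ih pr (some d) (a || pvTrig pp pr d nx), ih pr (some d) (false || pvTrig pp pr d nx)]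
      cases a <;> simp

theorem pvTrig_eq (pp pr : Option Char) (d : Char) (nx : Option Char) :
    pvTrig pp pr d nx = (!(pp == pr) && pr == some d && (!(some d == nx) || nx == none)) := by
  cases pp <;> cases pr <;> cases nx <;> simp [pvTrig, Bool.and_assoc]

theorem pvIsoZ_ins (l : List (Char × Option Char)) (pp pp' pr : Option Char)
    (h : (pp == pr) = (pp' == pr)) : pvIsoZ pp pr false l = pvIsoZ pp' pr false l := by
  cases l with
  | nil => rfl
  | cons p l =>
      obtain ⟨d, nx⟩ := p
      simp only [pvIsoZ, pvTrig_eq, h]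

theorem pvIsoZ_run (m : Nat) (c : Char) : ∀ rest : List Char,
    (∀ d, rest.head? = some d → ¬ d = c) →
    pvIsoZ (some c) (some c) false (pvLA (List.replicate m c ++ rest))
      = pvIsoZ none none false (pvLA rest) := by
  induction m with
  | zero =>
      intro rest hr
      cases rest with
      | nil => rfl
      | cons d u =>
          have hd : ¬ d = c := hr d rfl
          simp only [List.replicate_zero, List.nil_append, pvLA, pvIsoZ, pvTrig_eq]
          have h1 : (some c == some d) = false := by simpa using Ne.symm hd
          have h2 : ((none : Option Char) == some d) = false := by simp
          rw [h1, h2]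
          simp only [Bool.false_and, Bool.and_false, Bool.false_and, Bool.or_false]
          exact pvIsoZ_ins (pvLA u) (some c) none (some d) (by rw [h1, h2])
  | succ m ih =>
      intro rest hr
      simp only [List.replicate_succ, List.cons_append, pvLA, pvIsoZ, pvTrig_eq]
      simp only [BEq.rfl, Bool.not_true, Bool.false_and, Bool.or_false]
      exact ih rest hr

-- part-2 rule: A's isolated-double flag ↔ some run has length exactly 2
theorem pvIsoZ_runs (n : Nat) : ∀ s : List Char, s.length ≤ n →
    pvIsoZ none none false (pvLA s) = (pvRuns s).contains 2 := by
  induction n with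
  | zero =>
      intro s hs
      rw [List.length_eq_zero_iff.mp (Nat.le_zero.mp hs)]
      simp [pvLA, pvIsoZ, pvRuns]
  | succ n ih =>
      intro s hs
      cases s with
      | nil => simp [pvLA, pvIsoZ, pvRuns]
      | cons c t =>
          have hstep : pvIsoZ none none false (pvLA (c :: t))
              = pvIsoZ none (some c) false (pvLA t) := by
            simp [pvLA, pvIsoZ, pvTrig_eq]
          rw [hstep, pvRuns]
          rcases Nat.eq_zero_or_pos (pvLead c t) with hk | hk
          · rw [hk]
            cases t with
            | nil => simp [pvLA, pvIsoZ, pvRuns]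
            | cons d u =>
                have hd : ¬ d = c := pvLead_head (d :: u) c d (by simp [hk])
                have h1 : (some c == some d) = false := by simpa using Ne.symm hd
                have hL : pvIsoZ none (some c) false (pvLA (d :: u))
                    = pvIsoZ none (some d) false (pvLA u) := by
                  simp only [pvLA, pvIsoZ, pvTrig_eq, h1]
                  simp only [Bool.false_and, Bool.and_false, Bool.or_false]
                  exact pvIsoZ_ins (pvLA u) (some c) none (some d) (by simp [h1])
                have hR : pvIsoZ none none false (pvLA (d :: u))
                    = pvIsoZ none (some d) false (pvLA u) := by
                  simp [pvLA, pvIsoZ, pvTrig_eq]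
                rw [hL, ← hR, ih (d :: u) (by simpa using Nat.succ_le_succ_iff.mp hs)]
                simp
          · obtain ⟨u, hu⟩ := pvLead_pos t c hk
            subst hu
            have hlead : pvLead c (c :: u) = pvLead c u + 1 := by simp [pvLead]
            rcases Nat.eq_zero_or_pos (pvLead c u) with hk0 | hk1
            · -- run of length exactly 2: the flag is set at the second c
              have hu0 : ∀ d, u.head? = some d → ¬ d = c := by
                intro d hdu
                exact pvLead_head u c d (by rw [hk0, List.drop_zero]; exact hdu)
              have htrig : pvTrig none (some c) c u.head? = true := by
                rw [pvTrig_eq]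
                cases hu' : u.head? with
                | none => simp
                | some d => simp [show (some c == some d) = false by simpa using Ne.symm (hu0 d hu')]
              have : pvIsoZ none (some c) false (pvLA (c :: u)) = true := by
                simp only [pvLA, pvIsoZ, htrig, Bool.false_or]
                rw [pvIsoZ_or]
                simp
              rw [this, hlead, hk0]
              simp
            · -- run of length ≥ 3: no trigger, walk through the run
              obtain ⟨v, hv⟩ := pvLead_pos u c hk1
              subst hv
              have hnx : (c :: v).head? = some c := rfl
              have hL : pvIsoZ none (some c) false (pvLA (c :: c :: v))
                  = pvIsoZ (some c) (some c) false (pvLA (c :: v)) := by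
                simp [pvLA, pvIsoZ, pvTrig_eq]
              have hsplit := pvLead_split (c :: v) c
              have hrest : ∀ d, ((c :: v).drop (pvLead c (c :: v))).head? = some d → ¬ d = c :=
                fun d hd => pvLead_head (c :: v) c d hd
              have hAux : pvIsoZ (some c) (some c) false (pvLA (c :: v))
                  = pvIsoZ none none false (pvLA ((c :: v).drop (pvLead c (c :: v)))) := by
                conv_lhs => rw [← hsplit]
                exact pvIsoZ_run _ c _ hrest
              rw [hL, hAux, ih _ (by simp [List.length_drop] at hs ⊢; omega)]
              rw [hlead]
              simp only [List.drop_succ_cons]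
              simp
              intro h0
              exact absurd h0 (by omega)

-- str(x) facts: negative x starts with '-'; non-negative x starts with a digit
theorem pvToDigitsCore_ne_nil (f : Nat) : ∀ (n : Nat) (l : List Char),
    l ≠ [] ∨ 0 < f → Nat.toDigitsCore 10 f n l ≠ [] := by
  induction f with
  | zero => intro n l h; simpa [Nat.toDigitsCore] using h.resolve_right (by omega)
  | succ f ih =>
      intro n l _
      simp only [Nat.toDigitsCore]
      split
      · simp
      · exact ih _ _ (Or.inl (by simp))

theorem pvDigitChar_range (m : Nat) (hm : m < 10) :
    '0' ≤ Nat.digitChar m ∧ Nat.digitChar m ≤ '9' := by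
  interval_cases m <;> exact ⟨by decide, by decide⟩

theorem pvToDigitsCore_mem (f : Nat) : ∀ (n : Nat) (l : List Char) (c : Char),
    c ∈ Nat.toDigitsCore 10 f n l → c ∈ l ∨ ('0' ≤ c ∧ c ≤ '9') := by
  induction f with
  | zero => intro n l c h; exact Or.inl (by simpa [Nat.toDigitsCore] using h)
  | succ f ih =>
      intro n l c h
      simp only [Nat.toDigitsCore] at h
      have hd : '0' ≤ Nat.digitChar (n % 10) ∧ Nat.digitChar (n % 10) ≤ '9' :=
        pvDigitChar_range _ (Nat.mod_lt _ (by omega))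
      split at h
      · rcases List.mem_cons.mp h with h | h
        · exact Or.inr (h ▸ hd)
        · exact Or.inl h
      · rcases ih _ _ _ h with h | h
        · rcases List.mem_cons.mp h with h | h
          · exact Or.inr (h ▸ hd)
          · exact Or.inl h
        · exact Or.inr h

theorem pvToChars_pos (x : Int) (hx : 0 ≤ x) :
    ∃ c t, PySem.Int.toChars x = c :: t ∧ '0' ≤ c := by
  have hne : PySem.Int.toChars x ≠ [] := by
    simp only [PySem.Int.toChars, if_neg (by omega : ¬ x < 0), Nat.toDigits]
    exact pvToDigitsCore_ne_nil _ _ _ (Or.inr (by omega))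
  obtain ⟨c, t, hs⟩ := List.exists_cons_of_ne_nil hne
  refine ⟨c, t, hs, ?_⟩
  have hmem : c ∈ PySem.Int.toChars x := by rw [hs]; exact List.mem_cons_self
  rw [PySem.Int.toChars, if_neg (by omega : ¬ x < 0), Nat.toDigits] at hmem
  rcases pvToDigitsCore_mem _ _ _ _ hmem with h | h
  · simp at h
  · exact h.1

theorem pvBodyA_neg (part : Int) (acc : List Int) (x : Int) (hx : x < 0) :
    pvBodyA part acc x = acc := by
  have hdd : digits_decrease x = true := by
    simp [digits_decrease, PySem.Int.toChars, if_pos hx, pvDDLoop]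
  simp [pvBodyA, hdd]

theorem pvBody_eq (part : Int) (acc : List Int) (x : Int) (hx : 0 ≤ x) :
    pvBodyA part acc x = pvBodyB part acc x := by
  obtain ⟨c, t, hs, hc⟩ := pvToChars_pos x hx
  have hdd : digits_decrease x
      = !((PySem.Int.toChars x).zip ((PySem.Int.toChars x).drop 1)).all
          (fun q => decide (q.1 ≤ q.2)) := by
    rw [digits_decrease, hs]
    simp only [pvDDLoop]
    rw [if_neg (not_lt.mpr hc), pvDDLoop_eq t c]
    simp
  have hnd : no_double x
      = !((PySem.Int.toChars x).zip ((PySem.Int.toChars x).drop 1)).any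
          (fun q => q.1 == q.2) := by
    rw [no_double, pvNDLoop_none_eq]
  have hiso : has_isolated_double x = (pvRuns (PySem.Int.toChars x)).contains 2 := by
    rw [has_isolated_double, show (0 : Int) = ((0 : Nat) : Int) by simp,
      pvIsoFold_eq (PySem.Int.toChars x) (PySem.Int.toChars x) 0 (by simp)]
    exact pvIsoZ_runs (PySem.Int.toChars x).length _ le_rfl
  have hdbl : (pvRuns (PySem.Int.toChars x)).any (fun r => decide (2 ≤ r))
      = ((PySem.Int.toChars x).zip ((PySem.Int.toChars x).drop 1)).any
          (fun q => q.1 == q.2) :=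
    pvRuns_double (PySem.Int.toChars x).length _ le_rfl
  simp only [pvBodyA, pvBodyB]
  cases hall : ((PySem.Int.toChars x).zip ((PySem.Int.toChars x).drop 1)).all
      (fun q => decide (q.1 ≤ q.2)) with
  | false =>
      rw [hall] at hdd
      simp [hdd]
  | true =>
      rw [hall] at hdd
      simp only [hdd, Bool.not_true, Bool.false_eq_true, if_false, if_true]
      by_cases hp1 : part = 1
      · subst hp1
        rw [hnd, hdbl]
        cases hadj : ((PySem.Int.toChars x).zip ((PySem.Int.toChars x).drop 1)).any
            (fun q => q.1 == q.2) <;> simp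
      · by_cases hp2 : part = 2
        · subst hp2
          rw [hiso]
          cases h2r : (pvRuns (PySem.Int.toChars x)).contains 2 <;> simp
        · have h1 : (part == 1) = false := by simpa using hp1
          have h2 : (part == 2) = false := by simpa using hp2
          simp [h1, h2]

-- ===== VERDICT (by name: the statement is the Claim_ definition above) =====
theorem calculate_passwords_spec : Claim_equal_calculate_passwords := by
  intro low up part _
  unfold Spec_calculate_passwords calculate_passwords calculate_passwords_alt
  have hcore : ∀ m : Int, 0 ≤ m →
      (PySem.List.pyRange m up 1).foldl (pvBodyA part) []
        = (PySem.List.pyRange m up 1).foldl (pvBodyB part) [] := by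
    intro m hm
    exact PySem.List.foldl_congr_mem (PySem.List.pyRange m up 1) (pvBodyA part) (pvBodyB part) []
      (fun acc x hx =>
        pvBody_eq part acc x (by have := PySem.List.mem_pyRange_one.mp hx; omega))
  have hdrop : ∀ l : List Int, (∀ x ∈ l, x < 0) → l.foldl (pvBodyA part) [] = [] := by
    intro l hl
    rw [PySem.List.foldl_congr_mem l (pvBodyA part) (fun acc _ => acc) []
      (fun acc x hx => pvBodyA_neg part acc x (hl x hx))]
    exact PySem.List.foldl_ignore l []
  by_cases hl : 0 ≤ low
  · rw [max_eq_left (by omega : (0 : Int) ≤ low)]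
    exact hcore low hl
  · push Not at hl
    rw [max_eq_right (by omega : low ≤ (0 : Int))]
    by_cases hu : up ≤ 0
    · rw [PySem.List.pyRange_one_eq_nil hu, List.foldl_nil]
      exact hdrop _ (fun x hx => by have := PySem.List.mem_pyRange_one.mp hx; omega)
    · push Not at hu
      rw [PySem.List.pyRange_one_append low 0 up (by omega) (by omega), List.foldl_append,
        hdrop (PySem.List.pyRange low 0 1)
          (fun x hx => by have := PySem.List.mem_pyRange_one.mp hx; omega)]
      exact hcore 0 le_rfl
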